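-- pv_equiv track=rewrite | github.com/kuznetsovvj/education | algorithms/codeforces/1490a.py | check
-- ===== SOURCE A (Python) =====
-- def check(seq):
--     res = 0
--     for i in range(1, len(seq)):
--         mx = max(seq[i], seq[i-1])
--         mn = min(seq[i], seq[i-1])
--         if mx / mn <= 2:
--             continue
--         # наверное, можно более эффективно посчитать через логарифм
--         while mx > mn:
--             mn = mn * 2
--             res += 1
--         res -= 1
--     return res
-- ===== SOURCE B (Python) =====
-- def check(seq):
--     res = 0
--     for lo, hi in zip(seq, seq[1:]):
--         if hi < lo:
--             lo, hi = hi, lo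
--         if 0 < lo and 2 * lo < hi:
--             res += ((hi - 1) // lo).bit_length() - 1
--     return res
-- ===== Notes on version B (the rewrite author's own statement) =====
-- stated objective: faster
-- what changed: B replaces A's per-pair while-loop that doubles mn until it reaches mx by a closed-form bit-length computation ((hi-1)//lo).bit_length()-1 over adjacent pairs, removing the inner loop.
import Mathlib
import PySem

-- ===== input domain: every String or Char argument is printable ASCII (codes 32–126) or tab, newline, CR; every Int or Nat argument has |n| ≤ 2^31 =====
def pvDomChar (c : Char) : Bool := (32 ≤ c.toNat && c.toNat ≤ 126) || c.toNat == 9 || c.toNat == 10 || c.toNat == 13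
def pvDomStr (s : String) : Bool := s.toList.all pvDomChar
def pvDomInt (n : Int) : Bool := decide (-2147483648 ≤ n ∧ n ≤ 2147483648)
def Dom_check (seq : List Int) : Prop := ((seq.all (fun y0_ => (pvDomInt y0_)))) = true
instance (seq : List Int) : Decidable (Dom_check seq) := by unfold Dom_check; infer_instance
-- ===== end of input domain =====

-- B replaces A's per-pair doubling while-loop by a closed-form bit-length computation.

-- ===== PORT A =====
-- the while loop 'while mx > mn: mn *= 2; res += 1'; the extra '0 < mn' in the guard only
-- makes the recursion total — under Pre_check the loop is only ever entered with 0 < mn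
def checkLoop (mx mn res : Int) : Int :=
  if h : mn < mx ∧ 0 < mn then checkLoop mx (2 * mn) (res + 1) else res
termination_by (mx - mn).toNat
decreasing_by omega

def check (seq : List Int) : Int :=
  (PySem.List.pyRange 1 seq.length 1).foldl
    (fun res i =>
      let mx := max (PySem.List.pyGetD seq i 0) (PySem.List.pyGetD seq (i - 1) 0)
      let mn := min (PySem.List.pyGetD seq i 0) (PySem.List.pyGetD seq (i - 1) 0)
      -- float test 'mx / mn <= 2', ported by hand: exact for |n| ≤ 2^31 (Dom) and mn ≠ 0 (Pre_):
      -- for mn < 0 the true ratio is ≤ 1; for 0 < mn it is ≤ 2 iff mx ≤ 2*mn, and rounding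
      -- cannot cross 2 (|mx/mn - 2| ≥ 2^-31 there, while doubles near 2 are 2^-51 apart)
      if mn < 0 ∨ mx ≤ 2 * mn then res
      else checkLoop mx mn res - 1) 0

-- ===== PORT B =====
def check_alt (seq : List Int) : Int :=
  (seq.zip (seq.drop 1)).foldl
    (fun res p =>
      let lo := min p.1 p.2
      let hi := max p.1 p.2
      if 0 < lo ∧ 2 * lo < hi then
        res + ((PySem.Int.bitLength (PySem.Int.floordiv (hi - 1) lo) : Int) - 1)
      else res) 0

-- ===== PRECONDITION & SPEC =====
-- Pre_ excludes sequences with an adjacent pair whose minimum is 0: there A's 'mx / mn' raises ZeroDivisionError.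
def Pre_check (seq : List Int) : Prop :=
  ∀ p ∈ seq.zip (seq.drop 1), min p.1 p.2 ≠ 0
instance (seq : List Int) : Decidable (Pre_check seq) := by unfold Pre_check; infer_instance

def pvWitness_check : List Int := [1, 5, 2, -3, 7]

def Spec_check (seq : List Int) (out : Int) : Prop := out = check_alt seq
instance (seq : List Int) (out : Int) : Decidable (Spec_check seq out) := by unfold Spec_check; infer_instance

-- ===== CLAIM (what is proved, stated in full; the proofs are below) =====
def Claim_equal_check : Prop := ∀ (seq : List Int), Dom_check seq → Pre_check seq → Spec_check seq (check seq)

-- ===== LEMMAS AND PROOFS =====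

-- A's per-pair step and B's per-pair step, named for the proofs
def stepA (res : Int) (p : Int × Int) : Int :=
  let mx := max p.2 p.1
  let mn := min p.2 p.1
  if mn < 0 ∨ mx ≤ 2 * mn then res else checkLoop mx mn res - 1

def stepB (res : Int) (p : Int × Int) : Int :=
  let lo := min p.1 p.2
  let hi := max p.1 p.2
  if 0 < lo ∧ 2 * lo < hi then
    res + ((PySem.Int.bitLength (PySem.Int.floordiv (hi - 1) lo) : Int) - 1)
  else res

-- the while loop starting from 0 < mn < mx adds exactly bit_length((mx-1) // mn)
lemma checkLoop_eq (d : Nat) : ∀ (mx mn res : Int), (mx - mn).toNat ≤ d → 0 < mn → mn < mx →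
    checkLoop mx mn res = res + (PySem.Int.bitLength (PySem.Int.floordiv (mx - 1) mn) : Int) := by
  induction d with
  | zero => intro mx mn res hd h0 hlt; omega
  | succ d ih =>
    intro mx mn res hd h0 hlt
    rw [checkLoop]
    rw [dif_pos ⟨hlt, h0⟩]
    by_cases h2 : 2 * mn < mx
    · rw [ih mx (2 * mn) (res + 1) (by omega) (by omega) h2]
      have hqpos : (0 : Int) < PySem.Int.floordiv (mx - 1) mn := by
        have := (PySem.Int.le_floordiv_iff_mul_le (a := mx - 1) (b := mn) (q := 1) h0).mpr (by omega)
        omega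
      have hhalf : PySem.Int.floordiv (PySem.Int.floordiv (mx - 1) mn) 2
          = PySem.Int.floordiv (mx - 1) (2 * mn) := by
        rw [PySem.Int.floordiv_eq_ediv_of_pos h0, PySem.Int.floordiv_eq_ediv_of_pos (by omega),
            PySem.Int.floordiv_eq_ediv_of_pos (by omega),
            Int.ediv_ediv_of_nonneg (by omega : (0:Int) ≤ mn), mul_comm]
      rw [PySem.Int.bitLength_of_pos hqpos, hhalf]
      push_cast
      ring
    · rw [checkLoop, dif_neg (by omega)]
      have hq : PySem.Int.floordiv (mx - 1) mn = 1 := by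
        rw [PySem.Int.floordiv_eq_iff_of_pos h0]
        constructor <;> omega
      rw [hq]
      have hb : (PySem.Int.bitLength 1 : Nat) = 1 := rfl
      rw [hb]; norm_num

-- A's indexed fold reads exactly the adjacent pairs
lemma pairs_eq (seq : List Int) :
    (PySem.List.pyRange 1 seq.length 1).map
      (fun i => (PySem.List.pyGetD seq (i - 1) 0, PySem.List.pyGetD seq i 0))
      = seq.zip (seq.drop 1) := by
  apply List.ext_getElem
  · simp [PySem.List.length_pyRange_one]
  · intro k h1 h2
    simp only [List.getElem_map, PySem.List.getElem_pyRange_one, List.getElem_zip, List.getElem_drop]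
    have hk : k + 1 < seq.length := by
      simp [PySem.List.length_pyRange_one] at h1; omega
    have e1 : (1 : Int) + k - 1 = ((k : Nat) : Int) := by ring
    have e2 : (1 : Int) + k = ((k + 1 : Nat) : Int) := by push_cast; ring
    rw [e1, e2]
    simp only [PySem.List.pyGetD_natCast]
    rw [List.getD_eq_getElem _ _ (by omega), List.getD_eq_getElem _ _ hk]
    simp [Nat.add_comm]

lemma check_eq_foldl_stepA (seq : List Int) :
    check seq = (seq.zip (seq.drop 1)).foldl stepA 0 := by
  rw [← pairs_eq seq, List.foldl_map]
  rfl

lemma step_eq (res : Int) (p : Int × Int) (h : min p.1 p.2 ≠ 0) :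
    stepA res p = stepB res p := by
  obtain ⟨a, b⟩ := p
  simp only [stepA, stepB] at *
  by_cases hneg : min b a < 0
  · rw [if_pos (Or.inl hneg), if_neg (by omega)]
  · by_cases hle : max b a ≤ 2 * min b a
    · rw [if_pos (Or.inr hle), if_neg (by omega)]
    · rw [if_neg (by omega), if_pos (by omega)]
      have h0 : 0 < min b a := by omega
      have hlt : min b a < max b a := by omega
      rw [checkLoop_eq (max b a - min b a).toNat _ _ _ (le_refl _) h0 hlt]
      rw [show min a b = min b a by omega, show max a b = max b a by omega]
      ring

-- ===== VERDICT (by name: the statement is the Claim_ definition above) =====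
theorem check_spec : Claim_equal_check := by
  intro seq _ hpre
  unfold Spec_check
  rw [check_eq_foldl_stepA]
  show _ = (seq.zip (seq.drop 1)).foldl stepB 0
  exact PySem.List.foldl_congr_mem _ _ _ _ (fun res p hp => step_eq res p (hpre p hp))
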